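-- pv_equiv track=rewrite | github.com/CartoDB/analytics-toolbox-core | modules/quadkey/redshift/lib/__init__.py | kring
-- ===== SOURCE A (Python) =====
-- def quadint_from_zxy(z, x, y):
--     if z < 0 or z > 29:
--         return None
--
--     quadint = y
--     quadint <<= z
--     quadint |= x
--     quadint <<= 5
--     quadint |= z
--     return quadint
--
-- def zxy_from_quadint(quadint):
--     z = quadint & 31
--     x = (quadint >> 5) & ((1 << z) - 1)
--     y = quadint >> (z + 5)
--     return {'z': z, 'x': x, 'y': y}
--
-- def sibling(quadint, direction):
--     if quadint == 0:
--         return 0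
--     direction = direction.lower()
--     if direction not in ['left', 'right', 'up', 'down']:
--         raise Exception('Wrong direction argument passed to sibling')
--
--     tile = zxy_from_quadint(quadint)
--     z = tile['z']
--     x = tile['x']
--     y = tile['y']
--     tiles_per_level = 2 << (z - 1)
--     if direction == 'left':
--         x = x - 1 if x > 0 else tiles_per_level - 1
--
--     if direction == 'right':
--         x = x + 1 if x < tiles_per_level - 1 else 0
--
--     if direction == 'up':
--         y = y - 1 if y > 0 else tiles_per_level - 1
--
--     if direction == 'down':
--         y = y + 1 if y < tiles_per_level - 1 else 0
--
--     return quadint_from_zxy(z, x, y)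
--
-- def kring(origin, size):
--     corner_quadint = origin
--     # Traverse to top left corner
--     for i in range(0, size):
--         corner_quadint = sibling(corner_quadint, 'left')
--         corner_quadint = sibling(corner_quadint, 'up')
--
--     neighbors = []
--     traversal_quadint = 0
--
--     for j in range(0, size * 2 + 1):
--         traversal_quadint = corner_quadint
--         for i in range(0, size * 2 + 1):
--             neighbors.append(traversal_quadint)
--             traversal_quadint = sibling(traversal_quadint, 'right')
--         corner_quadint = sibling(corner_quadint, 'down')
--
--     return neighbors
-- ===== SOURCE B (Python) =====
-- def kring(origin, size):
--     z = origin & 31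
--     x = (origin >> 5) & ((1 << z) - 1)
--     y = origin >> (z + 5)
--     m = 1 << z
--     return [(((y + dy) % m) << (z + 5)) | (((x + dx) % m) << 5) | z
--             for dy in range(-size, size + 1)
--             for dx in range(-size, size + 1)]
-- ===== Notes on version B (the rewrite author's own statement) =====
-- stated objective: simpler
-- what changed: B decodes the origin once into (z, x, y) and emits each ring member directly as an encoded modular offset (x+dx mod 2^z, y+dy mod 2^z) in a double comprehension, replacing A's stepwise sibling-walk that re-decodes and re-encodes the quadint for every single tile move.
-- outside the precondition, e.g. on kring(129, 0): A returns [129], B returns [1]; on kring(-33, 0): A returns [-33], B returns [147573952589676412895]; on kring(30, 0): A returns [30], B returns [30]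
import Mathlib
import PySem

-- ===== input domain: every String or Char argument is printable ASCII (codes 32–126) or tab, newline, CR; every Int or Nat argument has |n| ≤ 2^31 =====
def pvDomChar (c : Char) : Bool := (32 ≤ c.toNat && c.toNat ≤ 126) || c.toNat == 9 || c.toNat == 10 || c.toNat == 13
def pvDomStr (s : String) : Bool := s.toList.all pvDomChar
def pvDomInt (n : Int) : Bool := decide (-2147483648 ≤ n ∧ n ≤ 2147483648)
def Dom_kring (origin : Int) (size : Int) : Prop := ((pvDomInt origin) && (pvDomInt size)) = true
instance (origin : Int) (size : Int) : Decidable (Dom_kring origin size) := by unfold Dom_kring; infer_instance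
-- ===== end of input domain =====

-- B re-implements kring by decoding the origin once and producing each ring member
-- directly with modular offsets, instead of A's tile-by-tile sibling traversal (objective: simpler).
-- ===== PORT A =====

-- shift amounts are `.toNat` of ints that are provably ≥ 0 where Python does not raise
def pvQuadintFromZxy (z x y : Int) : Option Int :=
  if z < 0 ∨ z > 29 then none else
    some (PySem.Int.bor ((PySem.Int.bor (y <<< z.toNat) x) <<< (5:Nat)) z)

def pvZxyFromQuadint (quadint : Int) : Int × Int × Int :=
  let z := PySem.Int.band quadint 31        -- always in [0, 31]
  let x := PySem.Int.band (quadint >>> (5:Nat)) (((1:Int) <<< z.toNat) - 1)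
  let y := quadint >>> (z.toNat + 5)
  (z, x, y)

-- `none` = the two exceptions: unknown direction, and the `2 << (z-1)` ValueError at z = 0
def pvSibling (quadint : Int) (direction : String) : Option Int :=
  if quadint = 0 then some 0 else
  let direction := PySem.Str.lower direction
  if ¬(direction = "left" ∨ direction = "right" ∨ direction = "up" ∨ direction = "down") then none else
  let t := pvZxyFromQuadint quadint
  let z := t.1
  let x0 := t.2.1
  let y0 := t.2.2
  if z = 0 then none else   -- Python raises ValueError (negative shift) here
  let tiles := (2 : Int) <<< (z - 1).toNat
  let x1 := if direction = "left" then (if x0 > 0 then x0 - 1 else tiles - 1) else x0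
  let x2 := if direction = "right" then (if x1 < tiles - 1 then x1 + 1 else 0) else x1
  let y1 := if direction = "up" then (if y0 > 0 then y0 - 1 else tiles - 1) else y0
  let y2 := if direction = "down" then (if y1 < tiles - 1 then y1 + 1 else 0) else y1
  pvQuadintFromZxy z x2 y2

-- exceptions (TypeError on a None quadint included) are threaded as `none`; A never
-- returns a list on those inputs, so the `| none => []` branch is outside Pre_
def kring (origin : Int) (size : Int) : List Int :=
  let corner : Option Int :=
    (PySem.List.pyRange 0 size 1).foldl
      (fun c _ => (c.bind fun q => pvSibling q "left").bind fun q => pvSibling q "up")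
      (some origin)
  let res : Option (List Int × Int) :=
    (PySem.List.pyRange 0 (size * 2 + 1) 1).foldl
      (fun st _ =>
        st.bind fun p =>
          let inner := (PySem.List.pyRange 0 (size * 2 + 1) 1).foldl
            (fun ist _ => ist.bind fun q =>
               (pvSibling q.2 "right").map fun t' => (q.1 ++ [q.2], t'))
            (some p)
          inner.bind fun q => (pvSibling p.2 "down").map fun c' => (q.1, c'))
      (corner.map fun c => ([], c))
  match res with
  | some p => p.1
  | none => []

-- ===== PORT B =====
def kring_alt (origin : Int) (size : Int) : List Int :=
  let z := PySem.Int.band origin 31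
  let x := PySem.Int.band (origin >>> (5:Nat)) (((1:Int) <<< z.toNat) - 1)
  let y := origin >>> (z.toNat + 5)
  let m : Int := (1:Int) <<< z.toNat
  (PySem.List.pyRange (-size) (size + 1) 1).flatMap fun dy =>
    (PySem.List.pyRange (-size) (size + 1) 1).map fun dx =>
      PySem.Int.bor
        (PySem.Int.bor ((PySem.Int.mod (y + dy) m) <<< (z.toNat + 5))
                       ((PySem.Int.mod (x + dx) m) <<< (5:Nat))) z

-- ===== PRECONDITION & SPEC =====
-- Pre_ restricts size ≥ 0 calls to the function's natural domain, well-formed quadints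
-- (zoom z ≤ 29 and coordinates below 2^z encoded in a non-negative int); on malformed
-- quadints A raises (z = 0, or z ≥ 30 with size ≥ 1) or returns values produced by its
-- accidental step-wise wrap rules; size < 0 never touches a tile and is always admitted.
def Pre_kring (origin : Int) (size : Int) : Prop :=
  size < 0 ∨ (0 ≤ origin ∧ origin % 32 ≤ 29 ∧ origin < 2 ^ (2 * (origin % 32).toNat + 5))
instance (origin : Int) (size : Int) : Decidable (Pre_kring origin size) := by unfold Pre_kring; infer_instance
def pvWitness_kring : Int × Int := (1347, 1)

def Spec_kring (origin : Int) (size : Int) (out : List Int) : Prop := out = kring_alt origin size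
instance (origin : Int) (size : Int) (out : List Int) : Decidable (Spec_kring origin size out) := by unfold Spec_kring; infer_instance

-- ===== CLAIM (what is proved, stated in full; the proofs are below) =====
def Claim_equal_kring : Prop := ∀ (origin : Int) (size : Int), Dom_kring origin size → Pre_kring origin size → Spec_kring origin size (kring origin size)

-- ===== LEMMAS AND PROOFS =====

theorem pvLorShiftAdd (k a b : Nat) (h : a < 2 ^ k) : b <<< k ||| a = b * 2 ^ k + a := by
  have hmod : (b <<< k ||| a) % 2 ^ k = a := by
    rw [← Nat.and_two_pow_sub_one_eq_mod, Nat.and_or_distrib_right,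
        Nat.and_two_pow_sub_one_eq_mod, Nat.and_two_pow_sub_one_eq_mod,
        Nat.shiftLeft_eq, Nat.mul_mod_left, Nat.mod_eq_of_lt h, Nat.zero_or]
  have hdiv : (b <<< k ||| a) / 2 ^ k = b := by
    have h1 : (b <<< k ||| a) >>> k = b <<< k >>> k ||| a >>> k := Nat.shiftRight_or_distrib ..
    rw [Nat.shiftRight_eq_div_pow, Nat.shiftRight_eq_div_pow, Nat.shiftRight_eq_div_pow] at h1
    rw [h1, Nat.shiftLeft_eq, Nat.mul_div_cancel _ (Nat.two_pow_pos k),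
        Nat.div_eq_of_lt h, Nat.or_zero]
  have h2 := Nat.div_add_mod (b <<< k ||| a) (2 ^ k)
  rw [hmod, hdiv] at h2
  rw [← h2]; ring

theorem pvIntShlCast (m k : Nat) : ((m : Int) <<< k) = ((m <<< k : Nat) : Int) := by
  rw [Int.shiftLeft_eq, Nat.shiftLeft_eq]; push_cast; ring

theorem pvIntShrCast (m k : Nat) : ((m : Int) >>> k) = ((m >>> k : Nat) : Int) := by
  rw [Int.shiftRight_eq_div_pow, Nat.shiftRight_eq_div_pow]
  exact_mod_cast (Int.natCast_div ..).symm

def pvEnc (zn : Nat) (a b : Int) : Int := b * 2 ^ (zn + 5) + a * 32 + zn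


theorem pvToNatLt (a : Int) (n : Nat) (ha0 : 0 ≤ a) (h : a < (2:Int) ^ n) : a.toNat < 2 ^ n := by
  have h2 : ((2:Int) ^ n) = ((2 ^ n : Nat) : Int) := by push_cast; ring
  rw [h2, ← Int.toNat_of_nonneg ha0] at h
  exact_mod_cast h

theorem pvEncNatCore (zn : Nat) (a b : Nat) (hz : zn < 32) (ha : a < 2 ^ zn) :
    (b <<< zn ||| a) <<< 5 ||| zn = b * 2 ^ (zn + 5) + a * 32 + zn := by
  rw [pvLorShiftAdd zn a b ha, pvLorShiftAdd 5 zn _ (by omega), pow_add]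
  ring

theorem pvEncA (zn : Nat) (a b : Int) (hz : zn < 32) (ha0 : 0 ≤ a) (ha : a < 2 ^ zn)
    (hb : 0 ≤ b) :
    PySem.Int.bor ((PySem.Int.bor (b <<< zn) a) <<< (5:Nat)) (zn : Int) = pvEnc zn a b := by
  have ha' := pvToNatLt a zn ha0 ha
  rw [← Int.toNat_of_nonneg ha0, ← Int.toNat_of_nonneg hb,
      pvIntShlCast, PySem.Int.bor_natCast, pvIntShlCast, PySem.Int.bor_natCast,
      pvEncNatCore zn a.toNat b.toNat hz ha', pvEnc]
  push_cast
  ring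

theorem pvEncB (zn : Nat) (a b : Int) (hz : zn < 32) (ha0 : 0 ≤ a) (ha : a < 2 ^ zn)
    (hb : 0 ≤ b) :
    PySem.Int.bor (PySem.Int.bor (b <<< (zn + 5)) (a <<< (5:Nat))) (zn : Int) = pvEnc zn a b := by
  have ha' := pvToNatLt a zn ha0 ha
  have hcore : b.toNat <<< (zn + 5) ||| a.toNat <<< 5 = (b.toNat <<< zn ||| a.toNat) <<< 5 := by
    rw [Nat.shiftLeft_add, Nat.shiftLeft_or_distrib]
  rw [← Int.toNat_of_nonneg ha0, ← Int.toNat_of_nonneg hb,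
      pvIntShlCast b.toNat (zn+5), pvIntShlCast a.toNat 5, PySem.Int.bor_natCast, hcore,
      PySem.Int.bor_natCast, pvEncNatCore zn a.toNat b.toNat hz ha', pvEnc]
  push_cast
  ring

theorem pvEncCast (zn : Nat) (a b : Int) (ha0 : 0 ≤ a) (hb0 : 0 ≤ b) :
    pvEnc zn a b = ((b.toNat * 2 ^ (zn + 5) + a.toNat * 32 + zn : Nat) : Int) := by
  rw [pvEnc]; push_cast [Int.toNat_of_nonneg ha0, Int.toNat_of_nonneg hb0]; ring

theorem pvDecZ (zn : Nat) (a b : Int) (hz : zn < 32) (ha0 : 0 ≤ a) (ha : a < 2 ^ zn)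
    (hb0 : 0 ≤ b) : PySem.Int.band (pvEnc zn a b) 31 = (zn : Int) := by
  rw [pvEncCast zn a b ha0 hb0, show (31 : Int) = ((31 : Nat) : Int) from rfl,
      PySem.Int.band_natCast, show (31 : Nat) = 2 ^ 5 - 1 from rfl,
      Nat.and_two_pow_sub_one_eq_mod]
  congr 1
  have : b.toNat * 2 ^ (zn + 5) = (b.toNat * 2 ^ zn) * 2 ^ 5 := by rw [pow_add]; ring
  rw [this]
  generalize b.toNat * 2 ^ zn = d
  omega

theorem pvDecX (zn : Nat) (a b : Int) (hz : zn < 32) (ha0 : 0 ≤ a) (ha : a < 2 ^ zn)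
    (hb0 : 0 ≤ b) :
    PySem.Int.band ((pvEnc zn a b) >>> (5:Nat)) (((1:Int) <<< zn) - 1) = a := by
  have ha' := pvToNatLt a zn ha0 ha
  have h1 : ((1:Int) <<< zn) - 1 = (((2 ^ zn - 1 : Nat)) : Int) := by
    rw [show (1:Int) = ((1:Nat) : Int) from rfl, pvIntShlCast, Nat.one_shiftLeft]
    have : 1 ≤ 2 ^ zn := Nat.one_le_two_pow
    push_cast [this]
    ring
  rw [h1, pvEncCast zn a b ha0 hb0, pvIntShrCast, PySem.Int.band_natCast,
      Nat.and_two_pow_sub_one_eq_mod, Nat.shiftRight_eq_div_pow]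
  have hdiv : (b.toNat * 2 ^ (zn + 5) + a.toNat * 32 + zn) / 2 ^ 5 = b.toNat * 2 ^ zn + a.toNat := by
    have : b.toNat * 2 ^ (zn + 5) = (b.toNat * 2 ^ zn) * 2 ^ 5 := by rw [pow_add]; ring
    rw [this]
    generalize b.toNat * 2 ^ zn = d
    omega
  rw [hdiv, Nat.mul_comm, Nat.mul_add_mod, Nat.mod_eq_of_lt ha', Int.toNat_of_nonneg ha0]

theorem pvDecY (zn : Nat) (a b : Int) (hz : zn < 32) (ha0 : 0 ≤ a) (ha : a < 2 ^ zn)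
    (hb0 : 0 ≤ b) : (pvEnc zn a b) >>> (zn + 5) = b := by
  have ha' := pvToNatLt a zn ha0 ha
  rw [pvEncCast zn a b ha0 hb0, pvIntShrCast, Nat.shiftRight_eq_div_pow]
  have : (b.toNat * 2 ^ (zn + 5) + a.toNat * 32 + zn) / 2 ^ (zn + 5) = b.toNat := by
    have hlt : a.toNat * 32 + zn < 2 ^ (zn + 5) := by
      have : 2 ^ (zn + 5) = 2 ^ zn * 32 := by rw [pow_add]; ring
      omega
    rw [Nat.mul_comm, Nat.add_assoc, Nat.mul_add_div (Nat.two_pow_pos _), Nat.div_eq_of_lt hlt, Nat.add_zero]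
  rw [this, Int.toNat_of_nonneg hb0]


theorem pvModSub (p q m : Int) : ((p % m) - q) % m = (p - q) % m := by
  rw [Int.sub_emod, Int.emod_emod_of_dvd _ dvd_rfl, ← Int.sub_emod]

theorem pvModAdd (p q m : Int) : ((p % m) + q) % m = (p + q) % m := by
  rw [Int.add_emod, Int.emod_emod_of_dvd _ dvd_rfl, ← Int.add_emod]

theorem pvWrapDec (a m : Int) (hm : 0 < m) (h0 : 0 ≤ a) (h1 : a < m) :
    (if a > 0 then a - 1 else m - 1) = (a - 1) % m := by
  split_ifs with h
  · rw [Int.emod_eq_of_lt (by omega) (by omega)]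
  · have ha : a = 0 := by omega
    subst ha
    have h2 : ((m - 1) + m * (-1)) % m = (m - 1) % m := Int.add_mul_emod_self_left ..
    have h3 : (0 - 1 : Int) = (m - 1) + m * (-1) := by ring
    rw [h3, h2, Int.emod_eq_of_lt (by omega) (by omega)]

theorem pvWrapInc (a m : Int) (hm : 0 < m) (h0 : 0 ≤ a) (h1 : a < m) :
    (if a < m - 1 then a + 1 else 0) = (a + 1) % m := by
  split_ifs with h
  · rw [Int.emod_eq_of_lt (by omega) (by omega)]
  · have ha : a = m - 1 := by omega
    subst ha
    rw [show (m - 1 + 1) = m by ring, Int.emod_self]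


theorem pvEncodeStep (zn : Nat) (v b : Int) (hz : zn ≤ 29) (hv0 : 0 ≤ v) (hv : v < 2 ^ zn)
    (hb0 : 0 ≤ b) : pvQuadintFromZxy (zn : Int) v b = some (pvEnc zn v b) := by
  simp only [pvQuadintFromZxy, Int.toNat_natCast]
  rw [if_neg (by push_cast; omega), pvEncA zn v b (by omega) hv0 hv hb0]

theorem pvSibLeft (zn : Nat) (a b : Int) (hz : zn ≤ 29) (hm : (0:Int) < 2 ^ zn)
    (ha0 : 0 ≤ a) (ha : a < 2 ^ zn) (hb0 : 0 ≤ b) (hb : b < 2 ^ zn) :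
    pvSibling (pvEnc zn a b) "left" = some (pvEnc zn ((a - 1) % (2 ^ zn)) b) := by
  rcases Nat.eq_zero_or_pos zn with h0 | hpos
  · subst h0
    have ha' : a = 0 := by omega
    have hb' : b = 0 := by omega
    subst ha'; subst hb'
    simp [pvSibling, pvEnc]
  · have hq0 : pvEnc zn a b ≠ 0 := by
      have hznp : (0:Int) < zn := by exact_mod_cast hpos
      have t1 : 0 ≤ b * 2 ^ (zn + 5) := mul_nonneg hb0 (by positivity)
      have t2 : 0 ≤ a * 32 := by linarith
      unfold pvEnc
      intro hcon
      linarith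
    have hdz := pvDecZ zn a b (by omega) ha0 ha hb0
    have hdx := pvDecX zn a b (by omega) ha0 ha hb0
    have hdy := pvDecY zn a b (by omega) ha0 ha hb0
    have htiles : (2:Int) <<< ((zn:Int) - 1).toNat = 2 ^ zn := by
      rw [show ((zn:Int) - 1).toNat = zn - 1 by omega, Int.shiftLeft_eq,
          show ((2:Int) * 2 ^ (zn-1)) = 2 ^ (zn - 1 + 1) by ring]
      congr 1
      omega
    have hlow : PySem.Str.lower "left" = "left" := by decide
    have hzne : (zn:Int) ≠ 0 := by exact_mod_cast Nat.pos_iff_ne_zero.mp hpos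
    simp only [pvSibling, pvZxyFromQuadint, Int.toNat_natCast, hdz, hdx, hdy, hq0, if_false,
               htiles, hlow, String.reduceEq, if_neg hzne, reduceIte, not_true, false_or, not_or]
    rw [pvWrapDec a _ hm ha0 ha, pvEncodeStep zn _ _ hz (Int.emod_nonneg _ (by omega)) (Int.emod_lt_of_pos _ hm) hb0]
    all_goals norm_num

theorem pvSibRight (zn : Nat) (a b : Int) (hz : zn ≤ 29) (hm : (0:Int) < 2 ^ zn)
    (ha0 : 0 ≤ a) (ha : a < 2 ^ zn) (hb0 : 0 ≤ b) (hb : b < 2 ^ zn) :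
    pvSibling (pvEnc zn a b) "right" = some (pvEnc zn ((a + 1) % (2 ^ zn)) b) := by
  rcases Nat.eq_zero_or_pos zn with h0 | hpos
  · subst h0
    have ha' : a = 0 := by omega
    have hb' : b = 0 := by omega
    subst ha'; subst hb'
    simp [pvSibling, pvEnc]
  · have hq0 : pvEnc zn a b ≠ 0 := by
      have hznp : (0:Int) < zn := by exact_mod_cast hpos
      have t1 : 0 ≤ b * 2 ^ (zn + 5) := mul_nonneg hb0 (by positivity)
      have t2 : 0 ≤ a * 32 := by linarith
      unfold pvEnc
      intro hcon
      linarith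
    have hdz := pvDecZ zn a b (by omega) ha0 ha hb0
    have hdx := pvDecX zn a b (by omega) ha0 ha hb0
    have hdy := pvDecY zn a b (by omega) ha0 ha hb0
    have htiles : (2:Int) <<< ((zn:Int) - 1).toNat = 2 ^ zn := by
      rw [show ((zn:Int) - 1).toNat = zn - 1 by omega, Int.shiftLeft_eq,
          show ((2:Int) * 2 ^ (zn-1)) = 2 ^ (zn - 1 + 1) by ring]
      congr 1
      omega
    have hlow : PySem.Str.lower "right" = "right" := by decide
    have hzne : (zn:Int) ≠ 0 := by exact_mod_cast Nat.pos_iff_ne_zero.mp hpos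
    simp only [pvSibling, pvZxyFromQuadint, Int.toNat_natCast, hdz, hdx, hdy, hq0, if_false,
               htiles, hlow, String.reduceEq, if_neg hzne, reduceIte, not_true, false_or, not_or]
    rw [pvWrapInc a _ hm ha0 ha, pvEncodeStep zn _ _ hz (Int.emod_nonneg _ (by omega)) (Int.emod_lt_of_pos _ hm) hb0]
    all_goals norm_num

theorem pvSibUp (zn : Nat) (a b : Int) (hz : zn ≤ 29) (hm : (0:Int) < 2 ^ zn)
    (ha0 : 0 ≤ a) (ha : a < 2 ^ zn) (hb0 : 0 ≤ b) (hb : b < 2 ^ zn) :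
    pvSibling (pvEnc zn a b) "up" = some (pvEnc zn a ((b - 1) % (2 ^ zn))) := by
  rcases Nat.eq_zero_or_pos zn with h0 | hpos
  · subst h0
    have ha' : a = 0 := by omega
    have hb' : b = 0 := by omega
    subst ha'; subst hb'
    simp [pvSibling, pvEnc]
  · have hq0 : pvEnc zn a b ≠ 0 := by
      have hznp : (0:Int) < zn := by exact_mod_cast hpos
      have t1 : 0 ≤ b * 2 ^ (zn + 5) := mul_nonneg hb0 (by positivity)
      have t2 : 0 ≤ a * 32 := by linarith
      unfold pvEnc
      intro hcon
      linarith
    have hdz := pvDecZ zn a b (by omega) ha0 ha hb0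
    have hdx := pvDecX zn a b (by omega) ha0 ha hb0
    have hdy := pvDecY zn a b (by omega) ha0 ha hb0
    have htiles : (2:Int) <<< ((zn:Int) - 1).toNat = 2 ^ zn := by
      rw [show ((zn:Int) - 1).toNat = zn - 1 by omega, Int.shiftLeft_eq,
          show ((2:Int) * 2 ^ (zn-1)) = 2 ^ (zn - 1 + 1) by ring]
      congr 1
      omega
    have hlow : PySem.Str.lower "up" = "up" := by decide
    have hzne : (zn:Int) ≠ 0 := by exact_mod_cast Nat.pos_iff_ne_zero.mp hpos
    simp only [pvSibling, pvZxyFromQuadint, Int.toNat_natCast, hdz, hdx, hdy, hq0, if_false,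
               htiles, hlow, String.reduceEq, if_neg hzne, reduceIte, not_true, false_or, not_or]
    rw [pvWrapDec b _ hm hb0 hb, pvEncodeStep zn _ _ hz ha0 ha (Int.emod_nonneg _ (by omega))]
    all_goals norm_num

theorem pvSibDown (zn : Nat) (a b : Int) (hz : zn ≤ 29) (hm : (0:Int) < 2 ^ zn)
    (ha0 : 0 ≤ a) (ha : a < 2 ^ zn) (hb0 : 0 ≤ b) (hb : b < 2 ^ zn) :
    pvSibling (pvEnc zn a b) "down" = some (pvEnc zn a ((b + 1) % (2 ^ zn))) := by
  rcases Nat.eq_zero_or_pos zn with h0 | hpos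
  · subst h0
    have ha' : a = 0 := by omega
    have hb' : b = 0 := by omega
    subst ha'; subst hb'
    simp [pvSibling, pvEnc]
  · have hq0 : pvEnc zn a b ≠ 0 := by
      have hznp : (0:Int) < zn := by exact_mod_cast hpos
      have t1 : 0 ≤ b * 2 ^ (zn + 5) := mul_nonneg hb0 (by positivity)
      have t2 : 0 ≤ a * 32 := by linarith
      unfold pvEnc
      intro hcon
      linarith
    have hdz := pvDecZ zn a b (by omega) ha0 ha hb0
    have hdx := pvDecX zn a b (by omega) ha0 ha hb0
    have hdy := pvDecY zn a b (by omega) ha0 ha hb0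
    have htiles : (2:Int) <<< ((zn:Int) - 1).toNat = 2 ^ zn := by
      rw [show ((zn:Int) - 1).toNat = zn - 1 by omega, Int.shiftLeft_eq,
          show ((2:Int) * 2 ^ (zn-1)) = 2 ^ (zn - 1 + 1) by ring]
      congr 1
      omega
    have hlow : PySem.Str.lower "down" = "down" := by decide
    have hzne : (zn:Int) ≠ 0 := by exact_mod_cast Nat.pos_iff_ne_zero.mp hpos
    simp only [pvSibling, pvZxyFromQuadint, Int.toNat_natCast, hdz, hdx, hdy, hq0, if_false,
               htiles, hlow, String.reduceEq, if_neg hzne, reduceIte, not_true, false_or, not_or]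
    rw [pvWrapInc b _ hm hb0 hb, pvEncodeStep zn _ _ hz ha0 ha (Int.emod_nonneg _ (by omega))]
    all_goals norm_num

theorem pvCornerLoop (zn : Nat) (hz : zn ≤ 29) :
    ∀ (l : List Int) (a b : Int), 0 ≤ a → a < 2 ^ zn → 0 ≤ b → b < 2 ^ zn →
    l.foldl (fun c _ => (c.bind fun q => pvSibling q "left").bind fun q => pvSibling q "up")
        (some (pvEnc zn a b))
      = some (pvEnc zn ((a - l.length) % 2 ^ zn) ((b - l.length) % 2 ^ zn)) := by
  intro l
  induction l with
  | nil =>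
      intro a b ha0 ha hb0 hb
      simp [Int.emod_eq_of_lt ha0 ha, Int.emod_eq_of_lt hb0 hb]
  | cons hd tl ih =>
      intro a b ha0 ha hb0 hb
      have hm : (0:Int) < 2 ^ zn := by positivity
      rw [List.foldl_cons]
      have hstep : ((some (pvEnc zn a b)).bind fun q => pvSibling q "left").bind
          (fun q => pvSibling q "up")
          = some (pvEnc zn ((a - 1) % 2 ^ zn) ((b - 1) % 2 ^ zn)) := by
        rw [Option.bind_some, pvSibLeft zn a b hz hm ha0 ha hb0 hb, Option.bind_some,
            pvSibUp zn _ b hz hm (Int.emod_nonneg _ (by omega)) (Int.emod_lt_of_pos _ hm) hb0 hb]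
      rw [hstep, ih _ _ (Int.emod_nonneg _ (by omega)) (Int.emod_lt_of_pos _ hm)
            (Int.emod_nonneg _ (by omega)) (Int.emod_lt_of_pos _ hm)]
      congr 2 <;> rw [pvModSub] <;> congr 1 <;> simp only [List.length_cons] <;> push_cast <;> ring

theorem pvRowLoop (zn : Nat) (hz : zn ≤ 29) (b : Int) (hb0 : 0 ≤ b) (hb : b < 2 ^ zn) :
    ∀ (l : List Int) (acc : List Int) (a : Int), 0 ≤ a → a < 2 ^ zn →
    l.foldl (fun ist _ => ist.bind fun q => (pvSibling q.2 "right").map fun t' => (q.1 ++ [q.2], t'))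
        (some (acc, pvEnc zn a b))
      = some (acc ++ (List.range l.length).map (fun i : Nat => pvEnc zn ((a + (i:Int)) % 2 ^ zn) b),
              pvEnc zn ((a + l.length) % 2 ^ zn) b) := by
  intro l
  induction l with
  | nil =>
      intro acc a ha0 ha
      simp [Int.emod_eq_of_lt ha0 ha]
  | cons hd tl ih =>
      intro acc a ha0 ha
      have hm : (0:Int) < 2 ^ zn := by positivity
      rw [List.foldl_cons, Option.bind_some, pvSibRight zn a b hz hm ha0 ha hb0 hb]
      simp only [Option.map_some]
      rw [ih (acc ++ [pvEnc zn a b]) _ (Int.emod_nonneg _ (by omega)) (Int.emod_lt_of_pos _ hm)]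
      have hf : ∀ i : Nat, pvEnc zn (((a + 1) % 2 ^ zn + (i:Int)) % 2 ^ zn) b
          = pvEnc zn ((a + ((i:Int) + 1)) % 2 ^ zn) b := by
        intro i
        rw [pvModAdd, show a + 1 + (i:Int) = a + ((i:Int) + 1) by ring]
      have hlist : acc ++ [pvEnc zn a b]
            ++ (List.range tl.length).map (fun i : Nat => pvEnc zn (((a+1) % 2 ^ zn + (i:Int)) % 2 ^ zn) b)
          = acc ++ (List.range (hd :: tl).length).map (fun i : Nat => pvEnc zn ((a + (i:Int)) % 2 ^ zn) b) := by
        rw [List.append_assoc, List.length_cons, List.range_succ_eq_map, List.map_cons,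
            List.map_map, List.singleton_append, Nat.cast_zero, add_zero,
            Int.emod_eq_of_lt ha0 ha]
        congr 1
        congr 1
        apply List.map_congr_left
        intro i _
        simp only [Function.comp_apply, hf, Nat.succ_eq_add_one]
        push_cast
        ring_nf
      rw [hlist, pvModAdd, show a + 1 + (tl.length : Int) = a + ((hd :: tl).length : Int) by
        simp only [List.length_cons]; push_cast; ring]

theorem pvGridLoop (zn : Nat) (hz : zn ≤ 29) (li : List Int) (a : Int)
    (ha0 : 0 ≤ a) (ha : a < 2 ^ zn) :
    ∀ (l : List Int) (acc : List Int) (b : Int), 0 ≤ b → b < 2 ^ zn →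
    l.foldl (fun st _ => st.bind fun p =>
        (li.foldl (fun ist _ => ist.bind fun q =>
            (pvSibling q.2 "right").map fun t' => (q.1 ++ [q.2], t')) (some p)).bind
          fun q => (pvSibling p.2 "down").map fun c' => (q.1, c'))
      (some (acc, pvEnc zn a b))
    = some (acc ++ (List.range l.length).flatMap (fun j : Nat =>
          (List.range li.length).map (fun i : Nat =>
            pvEnc zn ((a + (i:Int)) % 2 ^ zn) ((b + (j:Int)) % 2 ^ zn))),
        pvEnc zn a ((b + l.length) % 2 ^ zn)) := by
  intro l
  induction l with
  | nil =>
      intro acc b hb0 hb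
      simp [Int.emod_eq_of_lt hb0 hb]
  | cons hd tl ih =>
      intro acc b hb0 hb
      have hm : (0:Int) < 2 ^ zn := by positivity
      rw [List.foldl_cons, Option.bind_some,
          pvRowLoop zn hz b hb0 hb li acc a ha0 ha, Option.bind_some,
          pvSibDown zn a b hz hm ha0 ha hb0 hb]
      simp only [Option.map_some]
      rw [ih _ _ (Int.emod_nonneg _ (by omega)) (Int.emod_lt_of_pos _ hm)]
      have hf : ∀ j i : Nat, pvEnc zn ((a + (i:Int)) % 2 ^ zn) (((b + 1) % 2 ^ zn + (j:Int)) % 2 ^ zn)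
          = pvEnc zn ((a + (i:Int)) % 2 ^ zn) ((b + ((j:Int) + 1)) % 2 ^ zn) := by
        intro j i
        rw [pvModAdd, show b + 1 + (j:Int) = b + ((j:Int) + 1) by ring]
      have hlist : (acc ++ (List.range li.length).map (fun i : Nat => pvEnc zn ((a + (i:Int)) % 2 ^ zn) b))
            ++ (List.range tl.length).flatMap (fun j : Nat => (List.range li.length).map (fun i : Nat =>
                pvEnc zn ((a + (i:Int)) % 2 ^ zn) (((b + 1) % 2 ^ zn + (j:Int)) % 2 ^ zn)))
          = acc ++ (List.range (hd :: tl).length).flatMap (fun j : Nat => (List.range li.length).map (fun i : Nat =>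
                pvEnc zn ((a + (i:Int)) % 2 ^ zn) ((b + (j:Int)) % 2 ^ zn))) := by
        rw [List.append_assoc, List.length_cons, List.range_succ_eq_map, List.flatMap_cons,
            List.flatMap_map, Nat.cast_zero, add_zero, Int.emod_eq_of_lt hb0 hb]
        congr 1
        congr 1
        apply List.flatMap_congr
        intro j _
        apply List.map_congr_left
        intro i _
        simp only [hf, Nat.succ_eq_add_one]
        push_cast
        ring_nf
      rw [hlist, pvModAdd, show b + 1 + (tl.length : Int) = b + ((hd :: tl).length : Int) by
        simp only [List.length_cons]; push_cast; ring]

theorem pvPyRangeNil (a b : Int) (h : b ≤ a) : PySem.List.pyRange a b 1 = [] := by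
  simp [PySem.List.pyRange]
  omega

theorem pvPyRangeMap (a : Int) (n : Nat) :
    PySem.List.pyRange a (a + (n:Int)) 1 = (List.range n).map (fun i : Nat => a + (i:Int)) := by
  induction n with
  | zero => simpa using pvPyRangeNil a (a + 0) (by omega)
  | succ k ih =>
      rw [show a + ((k+1 : Nat) : Int) = (a + (k:Int)) + 1 by push_cast; ring,
          PySem.List.pyRange_one_succ_right (by omega), ih, List.range_succ, List.map_append,
          List.map_singleton]

theorem pvRep (origin : Int) (h0 : 0 ≤ origin) (hz : origin % 32 ≤ 29)
    (hy : origin < 2 ^ (2 * (origin % 32).toNat + 5)) :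
    origin = pvEnc ((origin % 32).toNat)
      ((origin / 32) % 2 ^ (origin % 32).toNat)
      (origin / 2 ^ ((origin % 32).toNat + 5)) := by
  set zn := (origin % 32).toNat with hzn
  have hc : (0:Int) < 2 ^ zn := by positivity
  have h32 : origin % 32 = (zn : Int) := by omega
  have hd1 : origin = 32 * (origin / 32) + (zn : Int) := by
    have := Int.ediv_add_emod origin 32
    omega
  have hd2 : origin / 32 = 2 ^ zn * (origin / 32 / 2 ^ zn) + (origin / 32) % 2 ^ zn :=
    (Int.ediv_add_emod _ _).symm
  have hdd : origin / 32 / 2 ^ zn = origin / 2 ^ (zn + 5) := by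
    rw [Int.ediv_ediv_of_nonneg (by norm_num),
        show (32 : Int) * 2 ^ zn = 2 ^ (zn + 5) by rw [pow_add]; ring]
  rw [pvEnc, ← hdd,
      show ((2:Int) ^ (zn + 5)) = 32 * 2 ^ zn by rw [pow_add]; ring]
  calc origin = 32 * (origin / 32) + (zn : Int) := hd1
    _ = 32 * (2 ^ zn * (origin / 32 / 2 ^ zn) + (origin / 32) % 2 ^ zn) + (zn : Int) := by
          rw [← hd2]
    _ = (origin / 32 / 2 ^ zn) * (32 * 2 ^ zn) + ((origin / 32) % 2 ^ zn) * 32 + (zn : Int) := by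
          ring

theorem pvMain (origin size : Int)
    (h : size < 0 ∨ (0 ≤ origin ∧ origin % 32 ≤ 29 ∧ origin < 2 ^ (2 * (origin % 32).toNat + 5))) :
    kring origin size = kring_alt origin size := by
  by_cases hneg : size < 0
  · have h1 : PySem.List.pyRange 0 size 1 = [] := pvPyRangeNil _ _ (by omega)
    have h2 : PySem.List.pyRange 0 (size * 2 + 1) 1 = [] := pvPyRangeNil _ _ (by omega)
    have h3 : PySem.List.pyRange (-size) (size + 1) 1 = [] := pvPyRangeNil _ _ (by omega)
    simp [kring, kring_alt, h1, h2, h3]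
  · rcases h with h' | ⟨h0, hz29, hy⟩
    · omega
    set zn := (origin % 32).toNat with hzn
    have hm : (0:Int) < 2 ^ zn := by positivity
    have hz : zn ≤ 29 := by omega
    set x0 := (origin / 32) % 2 ^ zn with hx0
    set y0 := origin / 2 ^ (zn + 5) with hy0
    have hrep := pvRep origin h0 hz29 hy
    rw [← hzn] at hrep
    rw [← hx0, ← hy0] at hrep
    have hx00 : 0 ≤ x0 := Int.emod_nonneg _ (by omega)
    have hx01 : x0 < 2 ^ zn := Int.emod_lt_of_pos _ hm
    have hy00 : 0 ≤ y0 := Int.ediv_nonneg h0 (by positivity)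
    have hy01 : y0 < 2 ^ zn := by
      have hlt : origin < 2 ^ (zn + 5) * 2 ^ zn := by
        rw [← pow_add, show zn + 5 + zn = 2 * zn + 5 by omega]
        exact hy
      rw [hy0]
      exact Int.ediv_lt_of_lt_mul (by positivity) (by linarith [hlt])
    have hsize0 : 0 ≤ size := by omega
    set n := (size * 2 + 1).toNat with hn
    have hncast : ((n : Int)) = size * 2 + 1 := by omega
    have hscast : ((size.toNat : Int)) = size := by omega
    have hr1 : PySem.List.pyRange 0 size 1
        = (List.range size.toNat).map (fun i : Nat => 0 + (i:Int)) := by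
      have hme := pvPyRangeMap 0 size.toNat
      rw [show (0:Int) + ((size.toNat : Nat) : Int) = size by omega] at hme
      exact hme
    have hr2 : PySem.List.pyRange 0 (size * 2 + 1) 1
        = (List.range n).map (fun i : Nat => 0 + (i:Int)) := by
      have hme := pvPyRangeMap 0 n
      rw [show (0:Int) + ((n : Nat) : Int) = size * 2 + 1 by omega] at hme
      exact hme
    have hr3 : PySem.List.pyRange (-size) (size + 1) 1
        = (List.range n).map (fun i : Nat => -size + (i:Int)) := by
      have hme := pvPyRangeMap (-size) n
      rw [show -size + ((n : Nat) : Int) = size + 1 by omega] at hme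
      exact hme
    rw [hrep]
    -- ===== A side =====
    rw [kring]
    simp only [hr1, hr2]
    rw [pvCornerLoop zn hz _ x0 y0 hx00 hx01 hy00 hy01]
    simp only [List.length_map, List.length_range, hscast, Option.map_some]
    rw [pvGridLoop zn hz _ ((x0 - size) % 2 ^ zn)
          (Int.emod_nonneg _ (by omega)) (Int.emod_lt_of_pos _ hm) _ []
          ((y0 - size) % 2 ^ zn) (Int.emod_nonneg _ (by omega)) (Int.emod_lt_of_pos _ hm)]
    simp only [List.length_map, List.length_range, List.nil_append]
    -- ===== B side =====
    rw [kring_alt]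
    simp only [pvDecZ zn x0 y0 (by omega) hx00 hx01 hy00, Int.toNat_natCast]
    simp only [pvDecX zn x0 y0 (by omega) hx00 hx01 hy00,
               pvDecY zn x0 y0 (by omega) hx00 hx01 hy00]
    simp only [show (1:Int) <<< zn = 2 ^ zn by rw [Int.shiftLeft_eq, one_mul],
               PySem.Int.mod_eq_emod_of_pos hm, hr3, List.flatMap_map, List.map_map,
               Function.comp_def]
    apply List.flatMap_congr
    intro j _
    apply List.map_congr_left
    intro i _
    rw [pvModAdd, pvModAdd]
    rw [pvEncB zn _ _ (by omega) (Int.emod_nonneg _ (ne_of_gt hm)) (Int.emod_lt_of_pos _ hm)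
          (Int.emod_nonneg _ (ne_of_gt hm))]
    congr 2 <;> ring

-- ===== VERDICT (by name: the statement is the Claim_ definition above) =====
theorem kring_spec : Claim_equal_kring := by
  intro origin size _ hpre
  unfold Spec_kring
  exact pvMain origin size hpre
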